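-- pv_equiv track=rewrite | github.com/lvyunyunSCI/EasyCen | easycen/kmer_pairs.py | canonical_int_for_kmer_str
-- ===== SOURCE A (Python) =====
-- BASE2VAL = {ord('A'):0, ord('C'):1, ord('G'):2, ord('T'):3,
--             ord('a'):0, ord('c'):1, ord('g'):2, ord('t'):3}
--
-- def kmer_to_int(kmer: str):
--     """Encode kmer (A/C/G/T) to integer using 2 bits/base. Return None if invalid base."""
--     v = 0
--     for ch in kmer:
--         try:
--             b = BASE2VAL[ord(ch)]
--         except KeyError:
--             return None
--         v = (v << 2) | b
--     return v
--
-- def canonical_int_for_kmer_str(kmer: str):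
--     """Return canonical integer (min of forward and reverse-complement ints)."""
--     k = len(kmer)
--     fwd = kmer_to_int(kmer)
--     if fwd is None:
--         return None
--     # reverse complement integer:
--     rc = 0
--     for ch in reversed(kmer):
--         try:
--             b = BASE2VAL[ord(ch)]
--         except KeyError:
--             return None
--         comp = 3 - b
--         rc = (rc << 2) | comp
--     return min(fwd, rc)
-- ===== SOURCE B (Python) =====
-- BASE2VAL = {ord('A'):0, ord('C'):1, ord('G'):2, ord('T'):3,
--             ord('a'):0, ord('c'):1, ord('g'):2, ord('t'):3}
--
-- def canonical_int_for_kmer_str(kmer: str):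
--     """Canonical integer: min of forward and reverse-complement 2-bit encodings.
--     The reverse complement is derived from the forward integer by bit
--     manipulation instead of a second dict-based scan of the string."""
--     fwd = 0
--     for ch in kmer:
--         b = BASE2VAL.get(ord(ch))
--         if b is None:
--             return None
--         fwd = (fwd << 2) | b
--     rc = 0
--     f = fwd
--     for _ in range(len(kmer)):
--         rc = (rc << 2) | (3 - (f & 3))
--         f >>= 2
--     return min(fwd, rc)
-- ===== Notes on version B (the rewrite author's own statement) =====
-- stated objective: alternative
-- what changed: B computes the reverse-complement integer purely from the forward integer's bits (peel low 2 bits, complement, append), replacing A's second dict-lookup scan over the reversed string.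
import Mathlib
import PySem

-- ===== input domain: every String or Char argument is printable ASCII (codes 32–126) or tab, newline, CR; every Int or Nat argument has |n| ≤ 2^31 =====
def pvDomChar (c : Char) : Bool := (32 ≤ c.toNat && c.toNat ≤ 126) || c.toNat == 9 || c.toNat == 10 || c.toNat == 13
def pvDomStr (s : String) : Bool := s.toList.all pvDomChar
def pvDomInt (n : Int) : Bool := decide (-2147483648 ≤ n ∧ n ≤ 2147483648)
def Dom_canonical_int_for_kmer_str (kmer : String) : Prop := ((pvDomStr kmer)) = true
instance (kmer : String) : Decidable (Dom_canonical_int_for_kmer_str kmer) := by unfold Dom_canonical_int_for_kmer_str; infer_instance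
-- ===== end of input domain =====

-- B replaces A's second dict-lookup scan over the reversed string by deriving the
-- reverse-complement integer from the forward integer's bits (alternative decomposition).

-- ===== PORT A =====
-- BASE2VAL as a Python dict (keys are ord values)
def pvBASE2VAL : PySem.Dict Int Int :=
  PySem.Dict.ofList [(65,0),(67,1),(71,2),(84,3),(97,0),(99,1),(103,2),(116,3)]

-- the loop of kmer_to_int; (v << 2) | b written as v*4+b, exact since v stays ≥ 0 and 0 ≤ b < 4
def pvKmerToIntGo : List Char → Int → Option Int
  | [], v => some v
  | c :: t, v =>
    match pvBASE2VAL.get? (Int.ofNat c.toNat) with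
    | none => none
    | some b => pvKmerToIntGo t (v * 4 + b)

def kmer_to_int (kmer : String) : Option Int := pvKmerToIntGo kmer.toList 0

-- the rc loop over reversed(kmer); (rc << 2) | comp written as rc*4+comp, exact (rc ≥ 0, 0 ≤ comp < 4)
def pvRcGo : List Char → Int → Option Int
  | [], rc => some rc
  | c :: t, rc =>
    match pvBASE2VAL.get? (Int.ofNat c.toNat) with
    | none => none
    | some b => pvRcGo t (rc * 4 + (3 - b))

def canonical_int_for_kmer_str (kmer : String) : Option Int :=
  match kmer_to_int kmer with
  | none => none
  | some fwd =>
    match pvRcGo kmer.toList.reverse 0 with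
    | none => none
    | some rc => some (min fwd rc)

-- ===== PORT B =====
-- Source B's forward loop (BASE2VAL.get, early None)
def pvAltFwdGo : List Char → Int → Option Int
  | [], fwd => some fwd
  | c :: t, fwd =>
    match pvBASE2VAL.get? (Int.ofNat c.toNat) with
    | none => none
    | some b => pvAltFwdGo t (fwd * 4 + b)

-- Source B's bit loop: f >>= 2 is floordiv f 4, f & 3 is mod f 4 (exact for all ints);
-- (rc << 2) | comp written as rc*4+comp, exact (rc ≥ 0, 0 ≤ comp < 4)
def pvRcBits : Nat → Int → Int → Int
  | 0, _, rc => rc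
  | n+1, f, rc => pvRcBits n (PySem.Int.floordiv f 4) (rc * 4 + (3 - PySem.Int.mod f 4))

def canonical_int_for_kmer_str_alt (kmer : String) : Option Int :=
  match pvAltFwdGo kmer.toList 0 with
  | none => none
  | some fwd => some (min fwd (pvRcBits kmer.toList.length fwd 0))

-- ===== PRECONDITION & SPEC =====
def Spec_canonical_int_for_kmer_str (kmer : String) (out : Option Int) : Prop := out = canonical_int_for_kmer_str_alt kmer
instance (kmer : String) (out : Option Int) : Decidable (Spec_canonical_int_for_kmer_str kmer out) := by unfold Spec_canonical_int_for_kmer_str; infer_instance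

-- ===== CLAIM (what is proved, stated in full; the proofs are below) =====
def Claim_equal_canonical_int_for_kmer_str : Prop := ∀ (kmer : String), Dom_canonical_int_for_kmer_str kmer → Spec_canonical_int_for_kmer_str kmer (canonical_int_for_kmer_str kmer)

-- ===== LEMMAS AND PROOFS =====

-- proof-side: the list of base values of a string, if all bases are valid
def pvVals : List Char → Option (List Int)
  | [] => some []
  | c :: t =>
    match pvBASE2VAL.get? (Int.ofNat c.toNat) with
    | none => none
    | some b => (pvVals t).map (b :: ·)

def pvHorner (v : Int) : List Int → Int
  | [] => v
  | b :: t => pvHorner (v * 4 + b) t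

lemma pvB2V_range (n b : Int) (h : pvBASE2VAL.get? n = some b) : 0 ≤ b ∧ b < 4 := by
  have hi := PySem.Dict.mem_items_of_get?_eq_some pvBASE2VAL h
  rw [show pvBASE2VAL.items = [(65,0),(67,1),(71,2),(84,3),(97,0),(99,1),(103,2),(116,3)] from rfl] at hi
  simp only [List.mem_cons, List.not_mem_nil, or_false, Prod.mk.injEq] at hi
  rcases hi with ⟨_,rfl⟩|⟨_,rfl⟩|⟨_,rfl⟩|⟨_,rfl⟩|⟨_,rfl⟩|⟨_,rfl⟩|⟨_,rfl⟩|⟨_,rfl⟩ <;> omega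

lemma pvVals_range (cs : List Char) (bs : List Int) (h : pvVals cs = some bs) :
    ∀ b ∈ bs, 0 ≤ b ∧ b < 4 := by
  induction cs generalizing bs with
  | nil => simp [pvVals] at h; subst h; simp
  | cons c t ih =>
    simp only [pvVals] at h
    cases hg : pvBASE2VAL.get? (Int.ofNat c.toNat) with
    | none => rw [hg] at h; simp at h
    | some b0 =>
      rw [hg] at h
      cases hv : pvVals t with
      | none => rw [hv] at h; simp at h
      | some bs' =>
        rw [hv] at h; simp at h
        intro b hb
        rw [← h] at hb
        rcases List.mem_cons.mp hb with rfl | hb'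
        · exact pvB2V_range _ _ hg
        · exact ih bs' hv b hb'

lemma pvVals_length (cs : List Char) : ∀ bs, pvVals cs = some bs → cs.length = bs.length := by
  induction cs with
  | nil => intro bs h; simp [pvVals] at h; subst h; rfl
  | cons c t ih =>
    intro bs h
    simp only [pvVals] at h
    cases hg : pvBASE2VAL.get? (Int.ofNat c.toNat) with
    | none => rw [hg] at h; simp at h
    | some b =>
      rw [hg] at h
      cases hv : pvVals t with
      | none => rw [hv] at h; simp at h
      | some bs' => rw [hv] at h; simp at h; simp [← h, ih bs' hv]

lemma pvKmerToIntGo_eq (cs : List Char) : ∀ v, pvKmerToIntGo cs v = (pvVals cs).map (pvHorner v) := by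
  induction cs with
  | nil => intro v; simp [pvKmerToIntGo, pvVals, pvHorner]
  | cons c t ih =>
    intro v
    simp only [pvKmerToIntGo, pvVals]
    cases pvBASE2VAL.get? (Int.ofNat c.toNat) with
    | none => simp
    | some b =>
      simp only [ih]
      cases pvVals t <;> rfl

lemma pvAltFwdGo_eq (cs : List Char) : ∀ v, pvAltFwdGo cs v = (pvVals cs).map (pvHorner v) := by
  induction cs with
  | nil => intro v; simp [pvAltFwdGo, pvVals, pvHorner]
  | cons c t ih =>
    intro v
    simp only [pvAltFwdGo, pvVals]
    cases pvBASE2VAL.get? (Int.ofNat c.toNat) with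
    | none => simp
    | some b =>
      simp only [ih]
      cases pvVals t <;> rfl

lemma pvRcGo_eq (cs : List Char) : ∀ bs rc, pvVals cs = some bs →
    pvRcGo cs rc = some (bs.foldl (fun a b => a * 4 + (3 - b)) rc) := by
  induction cs with
  | nil => intro bs rc h; simp [pvVals] at h; subst h; simp [pvRcGo]
  | cons c t ih =>
    intro bs rc h
    simp only [pvVals] at h
    cases hg : pvBASE2VAL.get? (Int.ofNat c.toNat) with
    | none => rw [hg] at h; simp at h
    | some b =>
      rw [hg] at h
      cases hv : pvVals t with
      | none => rw [hv] at h; simp at h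
      | some bs' =>
        rw [hv] at h; simp at h
        simp only [pvRcGo, hg, ← h, List.foldl_cons]
        exact ih bs' _ hv

lemma pvVals_append (xs ys : List Char) (u w : List Int)
    (hx : pvVals xs = some u) (hy : pvVals ys = some w) : pvVals (xs ++ ys) = some (u ++ w) := by
  induction xs generalizing u with
  | nil => simp [pvVals] at hx; subst hx; simpa using hy
  | cons c t ih =>
    simp only [pvVals] at hx
    simp only [List.cons_append, pvVals]
    cases hg : pvBASE2VAL.get? (Int.ofNat c.toNat) with
    | none => rw [hg] at hx; simp at hx
    | some b =>
      rw [hg] at hx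
      cases hv : pvVals t with
      | none => rw [hv] at hx; simp at hx
      | some u' =>
        rw [hv] at hx; simp at hx
        rw [ih u' hv]
        simp [← hx]

lemma pvVals_reverse (cs : List Char) (bs : List Int) (h : pvVals cs = some bs) :
    pvVals cs.reverse = some bs.reverse := by
  induction cs generalizing bs with
  | nil => simp [pvVals] at h; subst h; simp [pvVals]
  | cons c t ih =>
    simp only [pvVals] at h
    cases hg : pvBASE2VAL.get? (Int.ofNat c.toNat) with
    | none => rw [hg] at h; simp at h
    | some b =>
      rw [hg] at h
      cases hv : pvVals t with
      | none => rw [hv] at h; simp at h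
      | some bs' =>
        rw [hv] at h; simp at h
        have h1 : pvVals [c] = some [b] := by
          simp only [pvVals]; rw [hg]; rfl
        have := pvVals_append t.reverse [c] bs'.reverse [b] (ih bs' hv) h1
        simpa [← h] using this

lemma pvHorner_append (ys : List Int) (b : Int) : ∀ f, pvHorner f (ys ++ [b]) = pvHorner f ys * 4 + b := by
  induction ys with
  | nil => intro f; simp [pvHorner]
  | cons y t ih => intro f; simp only [List.cons_append, pvHorner]; exact ih _

lemma pvRcBits_eq (bs : List Int) (hr : ∀ b ∈ bs, 0 ≤ b ∧ b < 4) :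
    ∀ f rc, pvRcBits bs.length (pvHorner f bs) rc = bs.reverse.foldl (fun a b => a * 4 + (3 - b)) rc := by
  induction bs using List.reverseRecOn with
  | nil => intro f rc; simp [pvHorner, pvRcBits]
  | append_singleton ys b ih =>
    intro f rc
    have hb : 0 ≤ b ∧ b < 4 := hr b (by simp)
    have hlen : (ys ++ [b]).length = ys.length + 1 := by simp
    rw [hlen, pvHorner_append]
    have hd : PySem.Int.floordiv (pvHorner f ys * 4 + b) 4 = pvHorner f ys := by
      rw [PySem.Int.floordiv_eq_ediv_of_pos (by omega)]; omega
    have hm : PySem.Int.mod (pvHorner f ys * 4 + b) 4 = b := by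
      rw [PySem.Int.mod_eq_emod_of_pos (by omega)]; omega
    simp only [pvRcBits, hd, hm]
    rw [ih (fun x hx => hr x (by simp [hx])) f]
    simp

-- ===== VERDICT (by name: the statement is the Claim_ definition above) =====
theorem canonical_int_for_kmer_str_spec : Claim_equal_canonical_int_for_kmer_str := by
  intro kmer _
  unfold Spec_canonical_int_for_kmer_str canonical_int_for_kmer_str canonical_int_for_kmer_str_alt kmer_to_int
  rw [pvKmerToIntGo_eq, pvAltFwdGo_eq]
  cases h : pvVals kmer.toList with
  | none => simp
  | some bs =>
    simp only [Option.map_some]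
    rw [pvRcGo_eq kmer.toList.reverse bs.reverse 0 (pvVals_reverse _ _ h)]
    rw [pvVals_length _ _ h, pvRcBits_eq bs (pvVals_range _ _ h) 0 0]
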